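-- pv_equiv track=rewrite | github.com/goransta89-debug/Valtior | backend/services/version_diff.py | _determine_recommendation
-- ===== SOURCE A (Python) =====
-- def _determine_recommendation(persisting: list, new_only: list) -> tuple[str, str]:
--     """
--     Determine remediation recommendation level from persisting + new findings.
--     Returns (level, label).
--     """
--     all_open = persisting + new_only
--
--     critical = sum(1 for f in all_open if f.get("severity") == "Critical")
--     high     = sum(1 for f in all_open if f.get("severity") == "High")
--
--     if critical >= 1:
--         return "project", "Formal Remediation Project Required"
--     elif high >= 2:
--         return "targeted", "Targeted Remediation Sprint"
--     elif high == 1: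
--         return "targeted", "Targeted Fix Needed"
--     else:
--         return "none", "No Formal Action Required"
-- ===== SOURCE B (Python) =====
-- def _scan(findings, high):
--     """Single pass over one list: early-exit result (or None) and updated high count."""
--     for f in findings:
--         sev = f.get("severity")
--         if sev == "Critical":
--             return ("project", "Formal Remediation Project Required"), high
--         if sev == "High":
--             high += 1
--     return None, high
--
--
-- def _determine_recommendation(persisting: list, new_only: list) -> tuple[str, str]:
--     res, high = _scan(persisting, 0)
--     if res is None:
--         res, high = _scan(new_only, high)
--     if res is not None:
--         return res
--     if high >= 2:
--         return "targeted", "Targeted Remediation Sprint"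
--     if high == 1:
--         return "targeted", "Targeted Fix Needed"
--     return "none", "No Formal Action Required"
-- ===== Notes on version B (the rewrite author's own statement) =====
-- stated objective: alternative
-- what changed: Replaces the concatenation plus two separate counting comprehensions with one fused pass that reads each severity once, returns immediately on the first Critical, and maintains a single high counter.
import Mathlib
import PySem

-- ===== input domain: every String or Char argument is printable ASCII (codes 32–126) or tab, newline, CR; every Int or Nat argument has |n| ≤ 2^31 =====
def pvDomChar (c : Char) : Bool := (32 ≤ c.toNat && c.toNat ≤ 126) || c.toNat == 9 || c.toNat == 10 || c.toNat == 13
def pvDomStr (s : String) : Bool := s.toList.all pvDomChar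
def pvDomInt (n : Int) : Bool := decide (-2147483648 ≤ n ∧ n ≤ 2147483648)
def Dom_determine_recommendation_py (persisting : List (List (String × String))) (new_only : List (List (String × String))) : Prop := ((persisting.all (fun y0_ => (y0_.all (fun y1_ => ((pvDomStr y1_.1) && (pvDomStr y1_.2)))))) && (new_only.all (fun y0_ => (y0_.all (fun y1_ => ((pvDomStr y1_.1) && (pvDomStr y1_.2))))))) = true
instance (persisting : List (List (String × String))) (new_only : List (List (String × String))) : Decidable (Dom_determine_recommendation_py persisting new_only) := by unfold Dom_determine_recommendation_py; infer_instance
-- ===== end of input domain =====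

-- B fuses A's concatenation and two counting passes into one single pass with an early
-- return on the first Critical finding and a single high counter (objective: alternative).

-- ===== PORT A =====
def determine_recommendation_py (persisting : List (List (String × String))) (new_only : List (List (String × String))) : String × String :=
  let all_open := persisting ++ new_only
  let critical : Int := all_open.foldl
    (fun acc f => if (PySem.Dict.mk f).get? "severity" == some "Critical" then acc + 1 else acc) 0
  let high : Int := all_open.foldl
    (fun acc f => if (PySem.Dict.mk f).get? "severity" == some "High" then acc + 1 else acc) 0
  if critical ≥ 1 then ("project", "Formal Remediation Project Required")
  else if high ≥ 2 then ("targeted", "Targeted Remediation Sprint")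
  else if high == 1 then ("targeted", "Targeted Fix Needed")
  else ("none", "No Formal Action Required")

-- ===== PORT B =====
-- helper _scan: one pass over one list, early-exit result (or none) and updated high count
def pvScan : List (List (String × String)) → Int → Option (String × String) × Int
  | [], high => (none, high)
  | f :: rest, high =>
    let sev := (PySem.Dict.mk f).get? "severity"
    if sev == some "Critical" then (some ("project", "Formal Remediation Project Required"), high)
    else pvScan rest (if sev == some "High" then high + 1 else high)

def determine_recommendation_py_alt (persisting : List (List (String × String))) (new_only : List (List (String × String))) : String × String :=
  let s1 := pvScan persisting 0
  let s2 := if s1.1.isNone then pvScan new_only s1.2 else s1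
  match s2.1 with
  | some r => r
  | none =>
    if s2.2 ≥ 2 then ("targeted", "Targeted Remediation Sprint")
    else if s2.2 == 1 then ("targeted", "Targeted Fix Needed")
    else ("none", "No Formal Action Required")

-- ===== PRECONDITION & SPEC =====
def Spec_determine_recommendation_py (persisting : List (List (String × String))) (new_only : List (List (String × String))) (out : String × String) : Prop := out = determine_recommendation_py_alt persisting new_only
instance (persisting : List (List (String × String))) (new_only : List (List (String × String))) (out : String × String) : Decidable (Spec_determine_recommendation_py persisting new_only out) := by unfold Spec_determine_recommendation_py; infer_instance

-- ===== CLAIM (what is proved, stated in full; the proofs are below) =====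
def Claim_equal_determine_recommendation_py : Prop := ∀ (persisting : List (List (String × String))) (new_only : List (List (String × String))), Dom_determine_recommendation_py persisting new_only → Spec_determine_recommendation_py persisting new_only (determine_recommendation_py persisting new_only)

-- ===== LEMMAS AND PROOFS =====

def pvIsCrit (f : List (String × String)) : Bool := (PySem.Dict.mk f).get? "severity" == some "Critical"
def pvIsHigh (f : List (String × String)) : Bool := (PySem.Dict.mk f).get? "severity" == some "High"

theorem pvScan_fst (l : List (List (String × String))) (h : Int) :
    (pvScan l h).1 = if l.any pvIsCrit then some ("project", "Formal Remediation Project Required") else none := by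
  induction l generalizing h with
  | nil => simp [pvScan]
  | cons f rest ih =>
    simp only [pvScan, List.any_cons]
    by_cases hc : ((PySem.Dict.mk f).get? "severity" == some "Critical") = true
    · simp [pvIsCrit, hc]
    · simp [pvIsCrit, hc, ih]

theorem pvScan_snd (l : List (List (String × String))) (h : Int) (hnc : l.any pvIsCrit = false) :
    (pvScan l h).2 = h + (l.countP pvIsHigh : Int) := by
  induction l generalizing h with
  | nil => simp [pvScan]
  | cons f rest ih =>
    simp only [List.any_cons, Bool.or_eq_false_iff] at hnc
    obtain ⟨hc, hrest⟩ := hnc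
    simp only [pvIsCrit] at hc
    simp only [pvScan, hc, Bool.false_eq_true, if_false]
    rw [ih _ hrest]
    simp only [List.countP_cons, pvIsHigh]
    by_cases hh : ((PySem.Dict.mk f).get? "severity" == some "High") = true <;>
      simp [hh] <;> push_cast <;> ring

-- ===== VERDICT =====
theorem determine_recommendation_py_spec : Claim_equal_determine_recommendation_py := by
  intro persisting new_only _
  unfold Spec_determine_recommendation_py determine_recommendation_py determine_recommendation_py_alt
  simp only
  rw [PySem.List.foldl_if_add_one, PySem.List.foldl_if_add_one]
  simp only [zero_add]
  by_cases hp : persisting.any pvIsCrit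
  · have h1 : (pvScan persisting 0).1 = some ("project", "Formal Remediation Project Required") := by
      rw [pvScan_fst]; simp [hp]
    have hcrit : 0 < (persisting ++ new_only).countP pvIsCrit := by
      rw [List.countP_pos_iff]
      rcases List.any_eq_true.mp hp with ⟨x, hx, hpx⟩
      exact ⟨x, List.mem_append_left _ hx, hpx⟩
    rw [if_pos (by unfold pvIsCrit at hcrit; exact_mod_cast hcrit)]
    simp [h1]
  · have hp' : persisting.any pvIsCrit = false := by simpa using hp
    have h1 : (pvScan persisting 0).1 = none := by rw [pvScan_fst]; simp [hp']
    have h2 : (pvScan persisting 0).2 = (persisting.countP pvIsHigh : Int) := by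
      rw [pvScan_snd _ _ hp']; ring
    by_cases hn : new_only.any pvIsCrit
    · have h3 : (pvScan new_only (pvScan persisting 0).2).1 = some ("project", "Formal Remediation Project Required") := by
        rw [pvScan_fst]; simp [hn]
      have hcrit : 0 < (persisting ++ new_only).countP pvIsCrit := by
        rw [List.countP_pos_iff]
        rcases List.any_eq_true.mp hn with ⟨x, hx, hpx⟩
        exact ⟨x, List.mem_append_right _ hx, hpx⟩
      rw [if_pos (by unfold pvIsCrit at hcrit; exact_mod_cast hcrit)]
      simp [h1, h3]
    · have hn' : new_only.any pvIsCrit = false := by simpa using hn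
      have h3 : (pvScan new_only (pvScan persisting 0).2).1 = none := by
        rw [pvScan_fst]; simp [hn']
      have h4 : (pvScan new_only (pvScan persisting 0).2).2 = ((persisting ++ new_only).countP pvIsHigh : Int) := by
        rw [pvScan_snd _ _ hn', h2, List.countP_append]
        push_cast; ring
      have hcz : (persisting ++ new_only).countP pvIsCrit = 0 := by
        rw [List.countP_eq_zero]
        intro x hx
        rcases List.mem_append.mp hx with h | h
        · exact (List.any_eq_false.mp hp') x h
        · exact (List.any_eq_false.mp hn') x h
      rw [if_neg (by unfold pvIsCrit at hcz; rw [hcz]; norm_num)]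
      simp [h1, h3, h4]
      unfold pvIsHigh
      rfl
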